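-- pv_equiv track=rewrite | github.com/RainbowDragon/ACSL | Python/Contest 2/2020 - 2021/LexStringsSenior.py | rearranged_string
-- ===== SOURCE A (Python) =====
-- def rearranged_string(s):
--
--     char_count = [0] * 128
--     max_count = 0
--     for k in range(len(s)):
--         index = get_index_of_char(s[k])
--         if index != -1:
--             char_count[index] += 1
--             max_count = max(max_count, char_count[index])
--
--     blocks = [""] * (max_count + 1)
--     for k in range(128):
--         if char_count[k] > 0:
--             blocks[char_count[k]] += chr(k)
--
--     result = ""
--     sign = 1
--     is_first = True
--     for k in reversed(range(max_count + 1)):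
--         if blocks[k] != "":
--             if not is_first:
--                 result += ","
--
--             result += str(k)
--
--             if sign > 0:
--                 result += blocks[k]
--             else:
--                 result += blocks[k][::-1]
--
--             is_first = False
--             sign *= -1
--
--     return result
--
-- def get_index_of_char(c):
--
--     if c.isalnum():
--         return ord(c)
--     else:
--         return -1
-- ===== SOURCE B (Python) =====
-- def rearranged_string(s):
--
--     # counting phase kept identical to the original (128 slots indexed by ord)
--     char_count = [0] * 128
--     for ch in s:
--         index = get_index_of_char(ch)
--         if index != -1:
--             char_count[index] += 1
--
--     # (count, char) pairs sorted by descending count, ascending char,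
--     # then grouped by count with an alternating reversed flag
--     pairs = [(char_count[c], chr(c)) for c in range(128) if char_count[c] > 0]
--     pairs.sort(key=lambda t: (-t[0], t[1]))
--
--     parts = []
--     rev = False
--     i = 0
--     while i < len(pairs):
--         cnt = pairs[i][0]
--         chars = []
--         while i < len(pairs) and pairs[i][0] == cnt:
--             chars.append(pairs[i][1])
--             i += 1
--         if rev:
--             chars.reverse()
--         parts.append(str(cnt) + "".join(chars))
--         rev = not rev
--     return ",".join(parts)
--
-- def get_index_of_char(c):
--
--     if c.isalnum():
--         return ord(c)
--     else:
--         return -1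
-- ===== Notes on version B (the rewrite author's own statement) =====
-- stated objective: alternative
-- what changed: The counting-sort bucket table (blocks list indexed by frequency, read top-down with a sign/is_first accumulator) is replaced by building (count, char) pairs once, comparison-sorting them by (-count, char) and walking the sorted list grouping equal counts, emitting parts joined by commas.
import Mathlib
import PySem

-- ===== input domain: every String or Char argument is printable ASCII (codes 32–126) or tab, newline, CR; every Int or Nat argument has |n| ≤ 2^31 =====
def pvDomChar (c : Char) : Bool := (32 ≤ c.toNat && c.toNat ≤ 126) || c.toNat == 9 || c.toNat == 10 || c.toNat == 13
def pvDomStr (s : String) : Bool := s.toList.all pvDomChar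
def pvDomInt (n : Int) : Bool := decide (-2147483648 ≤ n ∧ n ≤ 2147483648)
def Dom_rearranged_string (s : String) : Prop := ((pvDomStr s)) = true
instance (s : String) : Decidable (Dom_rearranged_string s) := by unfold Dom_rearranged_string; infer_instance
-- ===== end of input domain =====

-- B replaces A's counting-sort bucket table and sign/is_first accumulator by a
-- comparison sort of (count, char) pairs walked in groups of equal count (objective: alternative).

-- ===== PORT A =====
def get_index_of_char (c : Char) : Int :=
  if PySem.Chars.isalnum c then (c.toNat : Int) else -1

def pvStepCountA (st : List Int × Int) (ch : Char) : List Int × Int :=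
  let index := get_index_of_char ch
  if index ≠ -1 then
    let cc := PySem.List.pySetD st.1 index (PySem.List.pyGetD st.1 index 0 + 1)
    (cc, max st.2 (PySem.List.pyGetD cc index 0))
  else st

def pvStepBlocks (cc : List Int) (bl : List (List Char)) (k : Nat) : List (List Char) :=
  if 0 < PySem.List.pyGetD cc (k : Int) 0 then
    PySem.List.pySetD bl (PySem.List.pyGetD cc (k : Int) 0)
      (PySem.List.pyGetD bl (PySem.List.pyGetD cc (k : Int) 0) [] ++ [Char.ofNat k])
  else bl

def pvStepRes (blocks : List (List Char)) (st : List Char × Int × Bool) (k : Nat) :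
    List Char × Int × Bool :=
  if PySem.List.pyGetD blocks (k : Int) [] ≠ [] then
    (((st.1 ++ (if st.2.2 then [] else [','])) ++ PySem.Int.toChars (k : Int)) ++
       (if 0 < st.2.1 then PySem.List.pyGetD blocks (k : Int) []
        else (PySem.List.pyGetD blocks (k : Int) []).reverse),
     st.2.1 * -1, false)
  else st

def rearranged_string (s : String) : String :=
  let cm := s.toList.foldl pvStepCountA (List.replicate 128 0, 0)
  let blocks := (List.range 128).foldl (pvStepBlocks cm.1)
      (List.replicate (cm.2.toNat + 1) [])
  let fin := ((List.range (cm.2.toNat + 1)).reverse).foldl (pvStepRes blocks)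
      ([], 1, true)
  String.ofList fin.1

-- ===== PORT B =====
def pvStepCountB (cc : List Int) (ch : Char) : List Int :=
  let index := get_index_of_char ch
  if index ≠ -1 then
    PySem.List.pySetD cc index (PySem.List.pyGetD cc index 0 + 1)
  else cc

-- the two while loops of Source B: split off the run of pairs sharing the leading count
def pvGroup : List (Int × Char) → Bool → List (List Char)
  | [], _ => []
  | (cnt, ch) :: rest, rev =>
    let grp := ch :: (rest.takeWhile (fun t => t.1 == cnt)).map Prod.snd
    let rest' := rest.dropWhile (fun t => t.1 == cnt)
    (PySem.Int.toChars cnt ++ (if rev then grp.reverse else grp)) :: pvGroup rest' (!rev)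
termination_by l _ => l.length
decreasing_by
  simp only [List.length_cons]
  have := List.length_dropWhile_le (fun t => t.1 == cnt) rest
  omega

def rearranged_string_alt (s : String) : String :=
  let char_count := s.toList.foldl pvStepCountB (List.replicate 128 0)
  let pairs := ((List.range 128).filter
      (fun (c : Nat) => 0 < PySem.List.pyGetD char_count (c : Int) 0)).map
      (fun (c : Nat) => (PySem.List.pyGetD char_count (c : Int) 0, Char.ofNat c))
  let sp := PySem.List.sorted2 pairs (fun t => -t.1) (fun t => t.2)
  String.ofList (PySem.Chars.join [','] (pvGroup sp false))

-- ===== PRECONDITION & SPEC =====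
def Spec_rearranged_string (s : String) (out : String) : Prop := out = rearranged_string_alt s
instance (s : String) (out : String) : Decidable (Spec_rearranged_string s out) := by unfold Spec_rearranged_string; infer_instance

-- ===== CLAIM (what is proved, stated in full; the proofs are below) =====
def Claim_equal_rearranged_string : Prop := ∀ (s : String), Dom_rearranged_string s → Spec_rearranged_string s (rearranged_string s)

-- ===== LEMMAS AND PROOFS =====

-- chars with count j, in ascending code order (the content of A's blocks[j])
def pvBucket (cc : List Int) (j : Nat) : List Char :=
  ((List.range 128).filter (fun c => 0 < cc.getD c 0 && cc.getD c 0 == (j : Int))).map Char.ofNat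

def pvBPairs (cc : List Int) (j : Nat) : List (Int × Char) :=
  ((List.range 128).filter (fun c => 0 < cc.getD c 0 && cc.getD c 0 == (j : Int))).map
    (fun c => ((j : Int), Char.ofNat c))

def pvPairsOf (cc : List Int) : List (Int × Char) :=
  ((List.range 128).filter (fun c => 0 < cc.getD c 0)).map
    (fun c => (cc.getD c 0, Char.ofNat c))

-- the alternating blocks, from the abstract bucket function
def pvParts (b : Nat → List Char) : List Nat → Bool → List (List Char)
  | [], _ => []
  | k :: ks, rev =>
    if b k = [] then pvParts b ks rev
    else (PySem.Int.toChars (k : Int) ++ (if rev then (b k).reverse else b k)) :: pvParts b ks (!rev)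

def pvCommaCat : Bool → List (List Char) → List Char
  | _, [] => []
  | first, p :: ps => (if first then [] else [',']) ++ p ++ pvCommaCat false ps

-- strict order on (count, char): descending count, ascending char
def pvRs (a b : Int × Char) : Prop := b.1 < a.1 ∨ (a.1 = b.1 ∧ a.2 < b.2)
-- its reflexive closure
def pvR (a b : Int × Char) : Prop := b.1 < a.1 ∨ (a.1 = b.1 ∧ a.2 ≤ b.2)

set_option maxRecDepth 100000 in
lemma pv_chr_lt : ∀ a < 128, ∀ b < 128, a < b → Char.ofNat a < Char.ofNat b := by decide

set_option maxRecDepth 100000 in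
lemma pv_chr_inj : ∀ a < 128, ∀ b < 128, Char.ofNat a = Char.ofNat b → a = b := by decide

lemma pv_countAB (l : List Char) (cc : List Int) (mx : Int) :
    (l.foldl pvStepCountA (cc, mx)).1 = l.foldl pvStepCountB cc := by
  induction l generalizing cc mx with
  | nil => rfl
  | cons c l ih =>
    simp only [List.foldl_cons]
    by_cases h : get_index_of_char c ≠ -1
    · simp only [pvStepCountA, pvStepCountB, if_pos h]; exact ih _ _
    · simp only [pvStepCountA, pvStepCountB, if_neg h]; exact ih _ _

lemma pv_join_comma (ps : List (List Char)) :
    PySem.Chars.join [','] ps = pvCommaCat true ps := by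
  have aux : ∀ (ps : List (List Char)) (p : List Char),
      PySem.Chars.join [','] (p :: ps) = p ++ pvCommaCat false ps := by
    intro ps
    induction ps with
    | nil => intro p; simp [PySem.Chars.join_singleton, pvCommaCat]
    | cons q ps ih =>
      intro p
      rw [PySem.Chars.join_cons_cons, ih q]
      simp [pvCommaCat]
  cases ps with
  | nil => simp [PySem.Chars.join_nil, pvCommaCat]
  | cons p ps => rw [aux ps p]; simp [pvCommaCat]

lemma pv_getD_set {α : Type} (l : List α) (i : Nat) (v : α) (j : Nat) (d : α) (hi : i < l.length) :
    (l.set i v).getD j d = if j = i then v else l.getD j d := by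
  simp only [List.getD_eq_getElem?_getD, List.getElem?_set]
  by_cases h : j = i
  · subst h; simp [hi]
  · simp [Ne.symm h, h]

lemma pv_count_inv (l : List Char) (hl : ∀ c ∈ l, c.toNat < 128) :
    ∀ (cc : List Int) (mx : Int), cc.length = 128 → (∀ j : Nat, 0 ≤ cc.getD j 0) →
    (∀ j : Nat, cc.getD j 0 ≤ mx) → 0 ≤ mx →
    (l.foldl pvStepCountA (cc, mx)).1.length = 128 ∧
    (∀ j : Nat, 0 ≤ (l.foldl pvStepCountA (cc, mx)).1.getD j 0) ∧
    (∀ j : Nat, (l.foldl pvStepCountA (cc, mx)).1.getD j 0 ≤ (l.foldl pvStepCountA (cc, mx)).2) ∧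
    0 ≤ (l.foldl pvStepCountA (cc, mx)).2 := by
  induction l with
  | nil => intro cc mx h1 h2 h3 h4; exact ⟨h1, h2, h3, h4⟩
  | cons ch l ih =>
    intro cc mx h1 h2 h3 h4
    have hch : ch.toNat < 128 := hl ch (by simp)
    have hl' : ∀ c ∈ l, c.toNat < 128 := fun c hc => hl c (by simp [hc])
    simp only [List.foldl_cons]
    by_cases ha : PySem.Chars.isalnum ch
    · have hidx : get_index_of_char ch = ((ch.toNat : Nat) : Int) := by
        simp [get_index_of_char, ha]
      have hne : ((ch.toNat : Nat) : Int) ≠ -1 := by omega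
      have hstep : pvStepCountA (cc, mx) ch =
          (cc.set ch.toNat (cc.getD ch.toNat 0 + 1),
           max mx ((cc.set ch.toNat (cc.getD ch.toNat 0 + 1)).getD ch.toNat 0)) := by
        simp [pvStepCountA, hidx, hne]
      rw [hstep]
      apply ih hl'
      · simpa using h1
      · intro j
        rw [pv_getD_set _ _ _ _ _ (by omega)]
        split_ifs with h
        · have := h2 ch.toNat; omega
        · exact h2 j
      · intro j
        rw [pv_getD_set _ _ _ _ _ (by omega)]
        split_ifs with h
        · exact le_max_of_le_right (le_of_eq (by rw [pv_getD_set _ _ _ _ _ (by omega)]; simp))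
        · exact le_max_of_le_left (h3 j)
      · omega
    · have hidx : get_index_of_char ch = -1 := by simp [get_index_of_char, ha]
      have hstep : pvStepCountA (cc, mx) ch = (cc, mx) := by simp [pvStepCountA, hidx]
      rw [hstep]
      exact ih hl' cc mx h1 h2 h3 h4

lemma pv_blocks_getD (cc : List Int) (l : List Nat) (bl : List (List Char))
    (h : ∀ c ∈ l, 0 < cc.getD c 0 → (cc.getD c 0).toNat < bl.length) (j : Nat) :
    (l.foldl (pvStepBlocks cc) bl).getD j [] =
      bl.getD j [] ++ (l.filter (fun c => 0 < cc.getD c 0 && cc.getD c 0 == (j : Int))).map Char.ofNat := by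
  induction l generalizing bl with
  | nil => simp
  | cons c l ih =>
    simp only [List.foldl_cons]
    by_cases h0 : 0 < cc.getD c 0
    · have hrange : (cc.getD c 0).toNat < bl.length := h c (by simp) h0
      have hstep : pvStepBlocks cc bl c =
          bl.set (cc.getD c 0).toNat (bl.getD (cc.getD c 0).toNat [] ++ [Char.ofNat c]) := by
        simp only [pvStepBlocks, PySem.List.pyGetD_natCast, if_pos h0]
        rw [PySem.List.pySetD_of_nonneg _ _ (by omega),
            PySem.List.pyGetD_of_nonneg _ _ (by omega)]
      rw [hstep, ih _ (by intro x hx hpos; rw [List.length_set]; exact h x (by simp [hx]) hpos),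
          pv_getD_set _ _ _ _ _ hrange]
      by_cases hj : cc.getD c 0 = (j : Int)
      · have hjt : j = (cc.getD c 0).toNat := by omega
        rw [if_pos hjt, List.filter_cons_of_pos (by simp only [Bool.and_eq_true, decide_eq_true_eq, beq_iff_eq]; exact ⟨h0, hj⟩)]
        rw [show (cc.getD c 0).toNat = j from hjt.symm]
        simp only [List.map_cons, List.append_assoc, List.singleton_append]
      · have hjt : ¬ j = (cc.getD c 0).toNat := by omega
        rw [if_neg hjt, List.filter_cons_of_neg (by simp only [Bool.and_eq_true, decide_eq_true_eq, beq_iff_eq, not_and]; exact fun _ => hj)]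
    · have hstep : pvStepBlocks cc bl c = bl := by
        simp only [pvStepBlocks, PySem.List.pyGetD_natCast]
        exact if_neg h0
      rw [hstep, ih _ (fun x hx hpos => h x (by simp [hx]) hpos),
          List.filter_cons_of_neg (by simp only [Bool.and_eq_true, decide_eq_true_eq, beq_iff_eq, not_and]; exact fun hpos => absurd hpos h0)]

lemma pv_res_foldl (blocks : List (List Char)) (ks : List Nat) (res : List Char)
    (sign : Int) (first : Bool) (hsign : sign = 1 ∨ sign = -1) :
    (ks.foldl (pvStepRes blocks) (res, sign, first)).1 =
      res ++ pvCommaCat first (pvParts (fun k => blocks.getD k []) ks (decide (sign < 0))) := by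
  induction ks generalizing res sign first with
  | nil => simp [pvParts, pvCommaCat]
  | cons k ks ih =>
    simp only [List.foldl_cons]
    by_cases hb : blocks.getD k [] = []
    · have hstep : pvStepRes blocks (res, sign, first) k = (res, sign, first) := by
        simp only [pvStepRes, PySem.List.pyGetD_natCast]
        exact if_neg (not_not_intro hb)
      rw [hstep, ih _ _ _ hsign]
      simp only [pvParts]
      rw [if_pos hb]
    · rcases hsign with rfl | rfl
      · have hstep : pvStepRes blocks (res, 1, first) k =
            (((res ++ (if first then [] else [','])) ++ PySem.Int.toChars (k : Int)) ++
              blocks.getD k [], -1, false) := by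
          simp only [pvStepRes, PySem.List.pyGetD_natCast]
          rw [if_pos (by exact hb)]
          norm_num
        rw [hstep, ih _ _ _ (Or.inr rfl)]
        simp only [pvParts]
        rw [if_neg hb]
        simp only [show decide ((1:Int) < 0) = false from rfl,
          show decide ((-1:Int) < 0) = true from rfl, Bool.not_false, if_neg (Bool.false_ne_true)]
        simp [pvCommaCat, List.append_assoc]
      · have hstep : pvStepRes blocks (res, -1, first) k =
            (((res ++ (if first then [] else [','])) ++ PySem.Int.toChars (k : Int)) ++
              (blocks.getD k []).reverse, 1, false) := by
          simp only [pvStepRes, PySem.List.pyGetD_natCast]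
          rw [if_pos (by exact hb)]
          norm_num
        rw [hstep, ih _ _ _ (Or.inl rfl)]
        simp only [pvParts]
        rw [if_neg hb]
        simp only [show decide ((1:Int) < 0) = false from rfl,
          show decide ((-1:Int) < 0) = true from rfl, Bool.not_true]
        simp [pvCommaCat, List.append_assoc]

lemma pv_insertBy_pairwise {α : Type} (before : α → α → Bool) (R : α → α → Prop)
    (h1 : ∀ a b, before a b = true → R a b) (h2 : ∀ a b, before a b = false → R b a)
    (htr : ∀ a b c, R a b → R b c → R a c) (x : α) (ys : List α) (hys : ys.Pairwise R) :
    (PySem.List.insertBy before x ys).Pairwise R := by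
  induction ys with
  | nil => simp [PySem.List.insertBy]
  | cons y ys ih =>
    rw [PySem.List.insertBy]
    rcases List.pairwise_cons.mp hys with ⟨hy, hys'⟩
    split_ifs with h
    · refine List.pairwise_cons.mpr ⟨?_, hys⟩
      intro z hz
      rcases List.mem_cons.mp hz with rfl | hz
      · exact h1 _ _ h
      · exact htr _ _ _ (h1 _ _ h) (hy z hz)
    · refine List.pairwise_cons.mpr ⟨?_, ih hys'⟩
      intro z hz
      rcases (PySem.List.mem_insertBy before x z ys).mp hz with rfl | hz
      · exact h2 _ _ (eq_false_of_ne_true h)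
      · exact hy z hz

lemma pv_foldl_insertBy_pairwise {α : Type} (before : α → α → Bool) (R : α → α → Prop)
    (h1 : ∀ a b, before a b = true → R a b) (h2 : ∀ a b, before a b = false → R b a)
    (htr : ∀ a b c, R a b → R b c → R a c) :
    ∀ (xs acc : List α), acc.Pairwise R →
      (xs.foldl (fun acc x => PySem.List.insertBy before x acc) acc).Pairwise R := by
  intro xs
  induction xs with
  | nil => intro acc h; exact h
  | cons x xs ih =>
    intro acc h
    exact ih _ (pv_insertBy_pairwise before R h1 h2 htr x acc h)

lemma pv_bpairs_fst (cc : List Int) (k : Nat) (x : Int × Char) (hx : x ∈ pvBPairs cc k) :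
    x.1 = (k : Int) := by
  rcases List.mem_map.mp hx with ⟨c, _, rfl⟩
  rfl

lemma pv_range_pairwise : (List.range 128).Pairwise (fun a b => a < b ∧ a < 128 ∧ b < 128) := by
  rw [List.pairwise_iff_getElem]
  intro i j hi hj hij
  simp only [List.getElem_range]
  simp only [List.length_range] at hi hj
  exact ⟨hij, hi, hj⟩

lemma pv_bpairs_pairwise (cc : List Int) (k : Nat) : (pvBPairs cc k).Pairwise pvRs := by
  unfold pvBPairs
  rw [List.pairwise_map]
  refine ((pv_range_pairwise.sublist List.filter_sublist).imp ?_)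
  rintro a b ⟨hab, ha, hb⟩
  exact Or.inr ⟨rfl, pv_chr_lt a ha b hb hab⟩

lemma pv_tgt_pairwise (cc : List Int) (m : Nat) :
    (((List.range (m + 1)).reverse).flatMap (pvBPairs cc)).Pairwise pvRs := by
  rw [List.pairwise_flatMap]
  constructor
  · intro k _; exact pv_bpairs_pairwise cc k
  · rw [List.pairwise_reverse]
    refine (List.pairwise_lt_range).imp ?_
    intro a b hab
    intro x hx y hy
    left
    rw [pv_bpairs_fst cc b x hx, pv_bpairs_fst cc a y hy]
    exact_mod_cast hab

lemma pv_tgt_nodup (cc : List Int) (m : Nat) :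
    (((List.range (m + 1)).reverse).flatMap (pvBPairs cc)).Nodup :=
  (pv_tgt_pairwise cc m).imp (by
    rintro a b (h | ⟨_, h⟩) rfl
    · exact lt_irrefl _ h
    · exact lt_irrefl _ h)

lemma pv_pairs_nodup (cc : List Int) : (pvPairsOf cc).Nodup := by
  unfold pvPairsOf
  refine List.Nodup.map_on ?_ ((List.nodup_range).filter _)
  intro a ha b hb hfe
  have ha' : a < 128 := List.mem_range.mp (List.mem_of_mem_filter ha)
  have hb' : b < 128 := List.mem_range.mp (List.mem_of_mem_filter hb)
  exact pv_chr_inj a ha' b hb' (congrArg Prod.snd hfe)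

lemma pv_mem_tgt_iff (cc : List Int) (mx : Int)
    (hle : ∀ j : Nat, cc.getD j 0 ≤ mx) (x : Int × Char) :
    x ∈ ((List.range (mx.toNat + 1)).reverse).flatMap (pvBPairs cc) ↔ x ∈ pvPairsOf cc := by
  simp only [List.mem_flatMap, List.mem_reverse, List.mem_range, pvBPairs, pvPairsOf,
    List.mem_map, List.mem_filter, List.mem_range, Bool.and_eq_true, decide_eq_true_eq,
    beq_iff_eq]
  constructor
  · rintro ⟨k, hk, c, ⟨hc, hpos, hck⟩, rfl⟩
    exact ⟨c, ⟨hc, hpos⟩, by rw [hck]⟩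
  · rintro ⟨c, ⟨hc, hpos⟩, rfl⟩
    refine ⟨(cc.getD c 0).toNat, ?_, c, ⟨hc, hpos, ?_⟩, ?_⟩
    · have := hle c; omega
    · omega
    · rw [Int.toNat_of_nonneg (le_of_lt hpos)]

lemma pv_sorted_pairs (cc : List Int) (mx : Int)
    (hnn : ∀ j : Nat, 0 ≤ cc.getD j 0) (hle : ∀ j : Nat, cc.getD j 0 ≤ mx) :
    PySem.List.sorted2 (pvPairsOf cc) (fun t => -t.1) (fun t => t.2) =
      ((List.range (mx.toNat + 1)).reverse).flatMap (pvBPairs cc) := by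
  have hperm : (PySem.List.sorted2 (pvPairsOf cc) (fun t => -t.1) (fun t => t.2)).Perm
      (((List.range (mx.toNat + 1)).reverse).flatMap (pvBPairs cc)) := by
    refine (PySem.List.sorted2_perm _ _ _ _).trans ?_
    exact ((List.perm_ext_iff_of_nodup (pv_tgt_nodup cc mx.toNat) (pv_pairs_nodup cc)).mpr
      (pv_mem_tgt_iff cc mx hle)).symm
  have hs : (PySem.List.sorted2 (pvPairsOf cc) (fun t => -t.1) (fun t => t.2)).Pairwise pvR := by
    have hdef : PySem.List.sorted2 (pvPairsOf cc) (fun t => -t.1) (fun t => t.2) =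
        (pvPairsOf cc).foldl (fun acc x => PySem.List.insertBy
          (fun (a b : Int × Char) => decide (-a.1 < -b.1) ||
            (!decide (-b.1 < -a.1) && decide (a.2 < b.2))) x acc) [] := rfl
    rw [hdef]
    refine pv_foldl_insertBy_pairwise _ pvR ?_ ?_ ?_ _ _ (List.Pairwise.nil)
    · intro a b h
      simp only [Bool.or_eq_true, Bool.and_eq_true, Bool.not_eq_true', decide_eq_true_eq,
        decide_eq_false_iff_not] at h
      rcases h with h | ⟨h1', h2'⟩
      · exact Or.inl (by omega)
      · rcases lt_or_eq_of_le (show b.1 ≤ a.1 by omega) with hlt | heq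
        · exact Or.inl hlt
        · exact Or.inr ⟨heq.symm, le_of_lt h2'⟩
    · intro a b h
      simp only [Bool.or_eq_false_iff, Bool.and_eq_false_iff, Bool.not_eq_false',
        decide_eq_false_iff_not, decide_eq_true_eq] at h
      rcases h with ⟨hh1, hh2⟩
      rcases hh2 with h' | h'
      · exact Or.inl (by omega)
      · rcases lt_or_eq_of_le (show a.1 ≤ b.1 by omega) with hlt | heq
        · exact Or.inl hlt
        · exact Or.inr ⟨heq.symm, not_lt.mp h'⟩
    · rintro a b c (hab | ⟨hab1, hab2⟩) (hbc | ⟨hbc1, hbc2⟩)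
      · exact Or.inl (lt_trans hbc hab)
      · exact Or.inl (by omega)
      · exact Or.inl (by omega)
      · exact Or.inr ⟨hab1.trans hbc1, le_trans hab2 hbc2⟩
  have ht : ((((List.range (mx.toNat + 1)).reverse).flatMap (pvBPairs cc))).Pairwise pvR :=
    (pv_tgt_pairwise cc mx.toNat).imp (by
      rintro a b (h | ⟨h1, h2⟩)
      · exact Or.inl h
      · exact Or.inr ⟨h1, le_of_lt h2⟩)
  refine List.Perm.eq_of_pairwise ?_ hs ht hperm
  rintro a b _ _ (hab | ⟨hab1, hab2⟩) (hba | ⟨hba1, hba2⟩)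
  · omega
  · exact absurd hab (by omega)
  · exact absurd hba (by omega)
  · exact Prod.ext hab1 (le_antisymm hab2 hba2)

lemma pv_takeWhile_nil {α : Type} (p : α → Bool) (l : List α) (h : ∀ x ∈ l, p x = false) :
    l.takeWhile p = [] := by
  cases l with
  | nil => rfl
  | cons x xs => simp [List.takeWhile_cons, h x (by simp)]

lemma pv_dropWhile_id {α : Type} (p : α → Bool) (l : List α) (h : ∀ x ∈ l, p x = false) :
    l.dropWhile p = l := by
  cases l with
  | nil => rfl
  | cons x xs => simp [List.dropWhile_cons, h x (by simp)]

lemma pv_group_flatMap (cc : List Int) :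
    ∀ (ks : List Nat), ks.Nodup → ∀ rev,
      pvGroup (ks.flatMap (pvBPairs cc)) rev = pvParts (pvBucket cc) ks rev := by
  intro ks
  induction ks with
  | nil => intro _ rev; rw [List.flatMap_nil]; simp [pvGroup, pvParts]
  | cons k ks ih =>
    intro hnd rev
    rcases List.nodup_cons.mp hnd with ⟨hk, hnd'⟩
    rw [List.flatMap_cons]
    by_cases hB : pvBucket cc k = []
    · have hF : (List.range 128).filter (fun c => 0 < cc.getD c 0 && cc.getD c 0 == (k : Int)) = [] := by
        unfold pvBucket at hB
        exact List.map_eq_nil_iff.mp hB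
      have hBP : pvBPairs cc k = [] := by
        unfold pvBPairs
        rw [hF]
        rfl
      rw [hBP, List.nil_append, ih hnd' rev]
      simp only [pvParts]
      rw [if_pos hB]
    · rcases hft : (List.range 128).filter (fun c => 0 < cc.getD c 0 && cc.getD c 0 == (k : Int)) with _ | ⟨c0, cs⟩
      · exact absurd (by unfold pvBucket; rw [hft]; rfl) hB
      have hBP : pvBPairs cc k = ((k : Int), Char.ofNat c0) :: cs.map (fun c => ((k : Int), Char.ofNat c)) := by
        unfold pvBPairs
        rw [hft, List.map_cons]
      have hBu : pvBucket cc k = Char.ofNat c0 :: cs.map Char.ofNat := by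
        unfold pvBucket
        rw [hft, List.map_cons]
      have hmem1 : ∀ x ∈ cs.map (fun c => ((k : Int), Char.ofNat c)), (x.1 == (k : Int)) = true := by
        intro x hx
        rcases List.mem_map.mp hx with ⟨c, _, rfl⟩
        simp
      have hmem2 : ∀ x ∈ ks.flatMap (pvBPairs cc), (x.1 == (k : Int)) = false := by
        intro x hx
        rcases List.mem_flatMap.mp hx with ⟨k', hk', hxk⟩
        rw [pv_bpairs_fst cc k' x hxk]
        have : k' ≠ k := fun h => hk (h ▸ hk')
        simp [this]
      rw [hBP, List.cons_append]
      rw [pvGroup]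
      rw [List.takeWhile_append_of_pos hmem1, pv_takeWhile_nil _ _ hmem2,
          List.dropWhile_append_of_pos hmem1, pv_dropWhile_id _ _ hmem2,
          List.append_nil]
      rw [ih hnd' (!rev)]
      have hgrp : Char.ofNat c0 :: (cs.map (fun c => ((k : Int), Char.ofNat c))).map Prod.snd =
          pvBucket cc k := by
        rw [hBu, List.map_map]
        rfl
      rw [hgrp]
      simp only [pvParts]
      rw [if_neg hB]

lemma pv_getD_replicate {α : Type} (n : Nat) (v : α) (j : Nat) (d : α) :
    (List.replicate n v).getD j d = if j < n then v else d := by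
  by_cases h : j < n <;>
    simp [List.getD_eq_getElem?_getD, List.getElem?_replicate, h]

-- ===== VERDICT (by name: the statement is the Claim_ definition above) =====
theorem rearranged_string_spec : Claim_equal_rearranged_string := by
  intro s hdom
  show rearranged_string s = rearranged_string_alt s
  have hdom' : s.toList.all pvDomChar = true := hdom
  have hchars : ∀ c ∈ s.toList, c.toNat < 128 := by
    intro c hc
    have h := List.all_eq_true.mp hdom' c hc
    simp only [pvDomChar, Bool.or_eq_true, Bool.and_eq_true, decide_eq_true_eq, beq_iff_eq] at h
    omega
  simp only [rearranged_string, rearranged_string_alt]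
  rw [← pv_countAB s.toList (List.replicate 128 0) 0]
  set p := s.toList.foldl pvStepCountA (List.replicate 128 0, 0) with hp
  have hrep : ∀ j : Nat, (List.replicate 128 (0:Int)).getD j 0 = 0 := by
    intro j
    rw [pv_getD_replicate]
    split_ifs <;> rfl
  obtain ⟨hlen, hnn, hle, hmx⟩ :=
    pv_count_inv s.toList hchars (List.replicate 128 0) 0 (by simp)
      (fun j => by rw [hrep]) (fun j => by rw [hrep]) le_rfl
  rw [← hp] at hlen hnn hle hmx
  have hbj : ∀ j : Nat,
      ((List.range 128).foldl (pvStepBlocks p.1) (List.replicate (p.2.toNat + 1) [])).getD j [] =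
        pvBucket p.1 j := by
    intro j
    rw [pv_blocks_getD p.1 (List.range 128) _ ?_ j]
    · rw [pv_getD_replicate]
      split_ifs <;> simp [pvBucket]
    · intro c _ hpos
      rw [List.length_replicate]
      have := hle c
      omega
  rw [pv_res_foldl _ _ [] 1 true (Or.inl rfl)]
  rw [show decide ((1:Int) < 0) = false from rfl]
  rw [show (fun k => ((List.range 128).foldl (pvStepBlocks p.1)
        (List.replicate (p.2.toNat + 1) [])).getD k []) = pvBucket p.1 from funext hbj]
  simp only [PySem.List.pyGetD_natCast]
  rw [show (((List.range 128).filter (fun c : Nat => decide (0 < p.1.getD c 0))).map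
        (fun c : Nat => (p.1.getD c 0, Char.ofNat c))) = pvPairsOf p.1 from rfl]
  rw [pv_sorted_pairs p.1 p.2 hnn hle]
  rw [pv_group_flatMap p.1 ((List.range (p.2.toNat + 1)).reverse)
        (List.nodup_reverse.mpr List.nodup_range) false]
  rw [pv_join_comma]
  rw [List.nil_append]
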